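-- pv_equiv track=rewrite | github.com/mrc-ide/leapfrog | cpp_generation/src/utils/config.py | get_shape_dim_types
-- ===== SOURCE A (Python) =====
-- def get_shape_dim_types(cfg):
--   all_static_dims = True
--   shape_dim_types = []
--   for index, dim in enumerate(cfg["dims"]):
--     if not all_static_dims:
--       shape_dim_types.append("nda::dim<0, nda::dynamic, nda::dynamic>")
--     elif "opts." in dim or "output_years" in dim:
--       stride = "1" if index == 0  else " * ".join([f"({d})" for d in cfg["dims"][:index]])
--       shape_dim_types.append(f"nda::dim<0, nda::dynamic, {stride}>")
--       all_static_dims = False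
--     else:
--       stride = "1" if index == 0 else " * ".join([f"({d})" for d in cfg["dims"][:index]])
--       shape_dim_types.append(f"nda::dim<0, {dim}, {stride}>")
--   return shape_dim_types
-- ===== SOURCE B (Python) =====
-- def get_shape_dim_types(cfg):
--     dims = cfg["dims"]
--     trigger = next((k for k, d in enumerate(dims) if "opts." in d or "output_years" in d), None)
--     n = len(dims) if trigger is None else trigger + 1
--     out = []
--     stride = "1"
--     for k, d in enumerate(dims[:n]):
--         if k == trigger:
--             out.append(f"nda::dim<0, nda::dynamic, {stride}>")
--         else:
--             out.append(f"nda::dim<0, {d}, {stride}>")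
--         stride = f"({d})" if k == 0 else f"{stride} * ({d})"
--     out.extend(["nda::dim<0, nda::dynamic, nda::dynamic>"] * (len(dims) - n))
--     return out
-- ===== Notes on version B (the rewrite author's own statement) =====
-- stated objective: faster
-- what changed: Instead of one loop that rebuilds each stride from scratch with a slice-and-join over the whole prefix, B finds the first dynamic dim up front, then builds the result in phases while maintaining the stride string incrementally, appending the constant dynamic entry for the tail in bulk.
import Mathlib
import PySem

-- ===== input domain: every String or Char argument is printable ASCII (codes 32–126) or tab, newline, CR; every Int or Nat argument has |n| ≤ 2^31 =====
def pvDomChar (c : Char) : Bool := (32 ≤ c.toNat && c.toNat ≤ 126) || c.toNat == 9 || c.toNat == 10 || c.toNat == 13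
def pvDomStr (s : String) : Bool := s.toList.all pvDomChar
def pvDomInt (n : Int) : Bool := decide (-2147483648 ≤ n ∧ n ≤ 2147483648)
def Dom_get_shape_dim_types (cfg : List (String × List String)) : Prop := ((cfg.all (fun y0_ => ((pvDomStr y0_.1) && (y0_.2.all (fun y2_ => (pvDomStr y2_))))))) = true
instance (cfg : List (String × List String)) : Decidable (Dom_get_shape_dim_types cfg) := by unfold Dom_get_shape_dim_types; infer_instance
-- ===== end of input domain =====

-- B re-implements A by a different decomposition: it finds the first dynamic dim up front, emits static entries with an incrementally maintained stride string (A rebuilds each stride by slicing and joining the whole prefix), and appends the constant dynamic entry for the tail in bulk.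


-- ===== PORT A =====
-- "opts." in dim or "output_years" in dim
def pvIsDyn (dim : String) : Bool := PySem.Str.isIn "opts." dim || PySem.Str.isIn "output_years" dim

-- f"({d})"
def pvParen (d : String) : String := "(" ++ d ++ ")"

-- stride = "1" if index == 0 else " * ".join([f"({d})" for d in cfg["dims"][:index]])
def pvStrideA (dims : List String) (index : Int) : String :=
  if index = 0 then "1"
  else PySem.Str.join " * " ((PySem.List.slice dims none (some index)).map pvParen)

def get_shape_dim_types (cfg : List (String × List String)) : List String :=
  match (PySem.Dict.mk cfg).get? "dims" with
  | none => []   -- KeyError in Python; excluded by Pre_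
  | some dims =>
    ((PySem.List.enumerate dims 0).foldl (fun (st : Bool × List String) p =>
      if !st.1 then (st.1, st.2 ++ ["nda::dim<0, nda::dynamic, nda::dynamic>"])
      else if pvIsDyn p.2 then
        (false, st.2 ++ ["nda::dim<0, nda::dynamic, " ++ pvStrideA dims p.1 ++ ">"])
      else
        (st.1, st.2 ++ ["nda::dim<0, " ++ p.2 ++ ", " ++ pvStrideA dims p.1 ++ ">"]))
      (true, [])).2

-- ===== PORT B =====
def pvDynConst : String := "nda::dim<0, nda::dynamic, nda::dynamic>"

-- the loop over enumerate(dims[:n]) with the incrementally maintained stride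
def pvBLoop (trigger : Option Nat) : Nat → String → List String → List String
  | _, _, [] => []
  | k, stride, d :: rest =>
    (if some k = trigger then "nda::dim<0, nda::dynamic, " ++ stride ++ ">"
     else "nda::dim<0, " ++ d ++ ", " ++ stride ++ ">")
    :: pvBLoop trigger (k+1) (if k = 0 then pvParen d else stride ++ " * " ++ pvParen d) rest

def get_shape_dim_types_alt (cfg : List (String × List String)) : List String :=
  match (PySem.Dict.mk cfg).get? "dims" with
  | none => []   -- KeyError in Python; excluded by Pre_
  | some dims =>
    let trigger := dims.findIdx? pvIsDyn
    let n := match trigger with | none => dims.length | some i => i + 1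
    pvBLoop trigger 0 "1" (dims.take n) ++ List.replicate (dims.length - n) pvDynConst

-- ===== PRECONDITION & SPEC =====
-- Pre_ excludes only cfgs without a "dims" key, on which A raises KeyError (B raises too).
def Pre_get_shape_dim_types (cfg : List (String × List String)) : Prop :=
  ((PySem.Dict.mk cfg).get? "dims").isSome = true
instance (cfg : List (String × List String)) : Decidable (Pre_get_shape_dim_types cfg) := by unfold Pre_get_shape_dim_types; infer_instance
def pvWitness_get_shape_dim_types : (List (String × List String)) := [("dims", ["x", "opts.t", "y"])]

def Spec_get_shape_dim_types (cfg : List (String × List String)) (out : List String) : Prop := out = get_shape_dim_types_alt cfg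
instance (cfg : List (String × List String)) (out : List String) : Decidable (Spec_get_shape_dim_types cfg out) := by unfold Spec_get_shape_dim_types; infer_instance

-- ===== CLAIM (what is proved, stated in full; the proofs are below) =====
def Claim_equal_get_shape_dim_types : Prop := ∀ (cfg : List (String × List String)), Dom_get_shape_dim_types cfg → Pre_get_shape_dim_types cfg → Spec_get_shape_dim_types cfg (get_shape_dim_types cfg)

-- ===== LEMMAS AND PROOFS =====

-- first index where a dynamic dim occurs, +1 (the number of entries B's main loop emits)
def pvN (dims : List String) : Nat :=
  match dims.findIdx? pvIsDyn with | none => dims.length | some i => i + 1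

-- common shape of both loops: the entry emitted at index k, recursing with the static flag
def specGo (dims : List String) : List String → Nat → Bool → List String
  | [], _, _ => []
  | d :: rest, k, b =>
    if b then
      if pvIsDyn d then ("nda::dim<0, nda::dynamic, " ++ pvStrideA dims (k : Int) ++ ">") :: specGo dims rest (k+1) false
      else ("nda::dim<0, " ++ d ++ ", " ++ pvStrideA dims (k : Int) ++ ">") :: specGo dims rest (k+1) true
    else pvDynConst :: specGo dims rest (k+1) false

theorem specGo_false (dims : List String) : ∀ (suf : List String) (k : Nat),
    specGo dims suf k false = List.replicate suf.length pvDynConst := by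
  intro suf
  induction suf with
  | nil => intro k; simp [specGo]
  | cons d rest ih => intro k; simp [specGo, List.replicate_succ, ih]

theorem A_fold (dims : List String) : ∀ (suf : List String) (k : Nat) (acc : List String) (b : Bool),
    ((PySem.List.enumerate suf (k : Int)).foldl (fun (st : Bool × List String) p =>
      if !st.1 then (st.1, st.2 ++ ["nda::dim<0, nda::dynamic, nda::dynamic>"])
      else if pvIsDyn p.2 then
        (false, st.2 ++ ["nda::dim<0, nda::dynamic, " ++ pvStrideA dims p.1 ++ ">"])
      else
        (st.1, st.2 ++ ["nda::dim<0, " ++ p.2 ++ ", " ++ pvStrideA dims p.1 ++ ">"]))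
      (b, acc)).2 = acc ++ specGo dims suf k b := by
  intro suf
  induction suf with
  | nil => intro k acc b; simp [PySem.List.enumerate_nil, specGo]
  | cons d rest ih =>
    intro k acc b
    rw [PySem.List.enumerate_cons, List.foldl_cons]
    have hk1 : (k : Int) + 1 = ((k + 1 : Nat) : Int) := by push_cast; ring
    cases b with
    | false =>
      simp only [Bool.not_false, if_pos, specGo]
      rw [hk1, ih]
      simp [pvDynConst, List.append_assoc]
    | true =>
      by_cases hd : pvIsDyn d
      · simp only [specGo, hd, Bool.not_true, if_true, if_false, Bool.false_eq_true]
        rw [hk1, ih]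
        simp [List.append_assoc]
      · simp only [specGo, hd, Bool.not_true, Bool.false_eq_true, ite_true, ite_false]
        rw [hk1, ih]
        simp [List.append_assoc]

theorem chars_join_concat (sep : List Char) : ∀ (xs : List (List Char)) (y : List Char), xs ≠ [] →
    PySem.Chars.join sep (xs ++ [y]) = PySem.Chars.join sep xs ++ sep ++ y := by
  intro xs
  induction xs with
  | nil => intro y h; exact absurd rfl h
  | cons a xs ih =>
    intro y _
    cases xs with
    | nil => simp [PySem.Chars.join_cons_cons, PySem.Chars.join_singleton]
    | cons b xs' =>
      have h2 := ih y (by simp)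
      simp only [List.cons_append] at h2 ⊢
      rw [PySem.Chars.join_cons_cons, PySem.Chars.join_cons_cons, h2]
      simp [List.append_assoc]

theorem str_join_concat (xs : List String) (y : String) (h : xs ≠ []) :
    PySem.Str.join " * " (xs ++ [y]) = PySem.Str.join " * " xs ++ " * " ++ y := by
  apply String.toList_inj.mp
  rw [PySem.Str.toList_join]
  simp only [String.toList_append, PySem.Str.toList_join, List.map_append, List.map_cons,
    List.map_nil]
  exact chars_join_concat _ _ _ (by simpa using h)

theorem str_join_single (y : String) : PySem.Str.join " * " [y] = y := by
  apply String.toList_inj.mp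
  rw [PySem.Str.toList_join]
  simp [PySem.Chars.join_singleton]

theorem stride_zero (dims : List String) : pvStrideA dims ((0 : Nat) : Int) = "1" := by
  simp [pvStrideA]

theorem stride_succ (dims : List String) (k : Nat) (hk : k < dims.length) :
    pvStrideA dims (((k + 1 : Nat)) : Int) =
      if k = 0 then pvParen dims[k] else pvStrideA dims (k : Int) ++ " * " ++ pvParen dims[k] := by
  have hslice : PySem.List.slice dims none (some ((k + 1 : Nat) : Int)) = dims.take (k + 1) :=
    PySem.List.slice_to_natCast dims (k + 1)
  have htake : dims.take (k + 1) = dims.take k ++ [dims[k]] := List.take_succ_eq_append_getElem hk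
  by_cases h0 : k = 0
  · subst h0
    simp only [pvStrideA, if_neg (by omega : ¬((1 : Nat) : Int) = 0)]
    rw [hslice, htake]
    simp [str_join_single]
  · simp only [pvStrideA, if_neg (by omega : ¬((k + 1 : Nat) : Int) = 0),
      if_neg (by omega : ¬((k : Nat) : Int) = 0), if_neg h0]
    rw [hslice, htake, List.map_append, List.map_singleton,
      str_join_concat _ _ (by
        simp only [ne_eq, List.map_eq_nil_iff, List.take_eq_nil_iff]
        intro h
        rcases h with h | h
        · exact h0 h
        · rw [h] at hk; simp at hk), PySem.List.slice_to_natCast dims k]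

theorem B_go (dims : List String) : ∀ (suf : List String) (k : Nat),
    dims.drop k = suf →
    (∀ j, j < k → ∀ (hj2 : j < dims.length), pvIsDyn dims[j] = false) →
    pvBLoop (dims.findIdx? pvIsDyn) k (pvStrideA dims (k : Int)) (suf.take (pvN dims - k))
      ++ List.replicate (suf.length - (pvN dims - k)) pvDynConst
    = specGo dims suf k true := by
  intro suf
  induction suf with
  | nil => intro k _ _; simp [pvBLoop, specGo]
  | cons d rest ih =>
    intro k hsuf hpre
    have hk : k < dims.length := by
      by_contra h
      rw [List.drop_eq_nil_of_le (by omega)] at hsuf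
      simp at hsuf
    have hdk : dims[k] = d ∧ dims.drop (k + 1) = rest := by
      have := (List.drop_eq_getElem_cons hk).symm.trans hsuf
      exact ⟨(List.cons.injEq _ _ _ _ ▸ this).1, (List.cons.injEq _ _ _ _ ▸ this).2⟩
    have hlen : rest.length + 1 = dims.length - k := by
      have := congrArg List.length hsuf
      simp at this; omega
    cases hfi : dims.findIdx? pvIsDyn with
    | none =>
      have hnone := List.findIdx?_eq_none_iff.mp hfi
      have hnN : pvN dims = dims.length := by simp [pvN, hfi]
      have hdf : pvIsDyn d = false := hdk.1 ▸ hnone _ (List.getElem_mem hk)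
      have h1 : pvN dims - k = (pvN dims - (k + 1)) + 1 := by omega
      rw [h1, List.take_succ_cons, pvBLoop]
      simp only [if_neg (by simp : ¬ some k = (none : Option Nat))]
      have hstep : (if k = 0 then pvParen d else pvStrideA dims (k : Int) ++ " * " ++ pvParen d)
          = pvStrideA dims ((k + 1 : Nat) : Int) := by rw [stride_succ dims k hk, hdk.1]
      rw [hstep, List.cons_append]
      have hrep : (d :: rest).length - (pvN dims - (k + 1) + 1) = rest.length - (pvN dims - (k + 1)) := by
        simp only [List.length_cons]; omega
      have ihh := ih (k + 1) hdk.2 (by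
        intro j hj hj2
        rcases Nat.lt_or_ge j k with h | h
        · exact hpre j h hj2
        · have : j = k := by omega
          subst this; rw [hdk.1]; exact hdf)
      rw [hfi] at ihh
      rw [hrep, ihh]
      simp [specGo, hdf]
    | some i =>
      obtain ⟨hi, hpi, hprev⟩ := List.findIdx?_eq_some_iff_getElem.mp hfi
      have hnN : pvN dims = i + 1 := by simp [pvN, hfi]
      have hki : k ≤ i := by
        by_contra h
        have := hpre i (by omega) hi
        rw [this] at hpi; exact Bool.noConfusion hpi
      by_cases hke : k = i
      · subst hke
        have hdt : pvIsDyn d = true := hdk.1 ▸ hpi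
        have h1 : pvN dims - k = 1 := by omega
        rw [h1, List.take_succ_cons, List.take_zero, pvBLoop]
        simp only [pvBLoop, List.cons_append, List.nil_append]
        have hrep : (d :: rest).length - 1 = rest.length := by simp
        rw [hrep]
        simp [specGo, hdt, specGo_false]
      · have hkil : k < i := by omega
        have hdf : pvIsDyn d = false := by
          have := hprev k hkil
          rw [hdk.1] at this
          exact Bool.not_eq_true _ ▸ (by simpa using this)
        have h1 : pvN dims - k = (pvN dims - (k + 1)) + 1 := by omega
        rw [h1, List.take_succ_cons, pvBLoop]
        simp only [if_neg (by simp [hke] : ¬ some k = some i)]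
        have hstep : (if k = 0 then pvParen d else pvStrideA dims (k : Int) ++ " * " ++ pvParen d)
            = pvStrideA dims ((k + 1 : Nat) : Int) := by rw [stride_succ dims k hk, hdk.1]
        rw [hstep, List.cons_append]
        have hrep : (d :: rest).length - (pvN dims - (k + 1) + 1) = rest.length - (pvN dims - (k + 1)) := by
          simp only [List.length_cons]; omega
        have ihh := ih (k + 1) hdk.2 (by
          intro j hj hj2
          rcases Nat.lt_or_ge j k with h | h
          · exact hpre j h hj2
          · have : j = k := by omega
            subst this; rw [hdk.1]; exact hdf)
        rw [hfi] at ihh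
        rw [hrep, ihh]
        simp [specGo, hdf]

theorem bodies_eq (dims : List String) :
    ((PySem.List.enumerate dims 0).foldl (fun (st : Bool × List String) p =>
      if !st.1 then (st.1, st.2 ++ ["nda::dim<0, nda::dynamic, nda::dynamic>"])
      else if pvIsDyn p.2 then
        (false, st.2 ++ ["nda::dim<0, nda::dynamic, " ++ pvStrideA dims p.1 ++ ">"])
      else
        (st.1, st.2 ++ ["nda::dim<0, " ++ p.2 ++ ", " ++ pvStrideA dims p.1 ++ ">"]))
      (true, [])).2
    = pvBLoop (dims.findIdx? pvIsDyn) 0 "1" (dims.take (pvN dims))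
        ++ List.replicate (dims.length - pvN dims) pvDynConst := by
  have hA := A_fold dims dims 0 [] true
  simp only [Nat.cast_zero, List.nil_append] at hA
  rw [hA]
  have hB := B_go dims dims 0 (by simp) (by intro j hj _; omega)
  rw [stride_zero] at hB
  simpa using hB.symm

-- ===== VERDICT (by name: the statement is the Claim_ definition above) =====
theorem get_shape_dim_types_spec : Claim_equal_get_shape_dim_types := by
  intro cfg _ hpre
  unfold Spec_get_shape_dim_types get_shape_dim_types get_shape_dim_types_alt
  cases h : (PySem.Dict.mk cfg).get? "dims" with
  | none => unfold Pre_get_shape_dim_types at hpre; rw [h] at hpre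
  | some dims =>
    simp only
    have hbody := bodies_eq dims
    rw [hbody]
    cases hfi : List.findIdx? pvIsDyn dims with
    | none => simp [pvN, hfi]
    | some i => simp [pvN, hfi]
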